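-- pv_equiv track=rewrite | github.com/BrettRey/erdos-problem-993 | radio_roots_hunt_optimized.py | spherically_symmetric_tree
-- ===== SOURCE A (Python) =====
-- from typing import List, Tuple, Optional, Dict, Any
--
-- def spherically_symmetric_tree(branching: List[int]) -> Tuple[int, List[Tuple[int, int]]]:
--     edges = []
--     current_level = [0]
--     next_id = 1
--     for b in branching:
--         new_level = []
--         for v in current_level:
--             for _ in range(b):
--                 child = next_id
--                 next_id += 1
--                 edges.append((v, child))
--                 new_level.append(child)
--         current_level = new_level
--     return next_id, edges
-- ===== SOURCE B (Python) =====
-- def spherically_symmetric_tree(branching):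
--     # Pass 1: table of levels (level_start, level_size, children_per_node); ids are contiguous.
--     levels = []
--     start, size = 0, 1
--     for b in branching:
--         nb = b if b > 0 else 0
--         levels.append((start, size, nb))
--         start, size = start + size, size * nb
--     # Pass 2: emit edges arithmetically from the table.
--     edges = [(p, lstart + lsize + (p - lstart) * nb + j)
--              for (lstart, lsize, nb) in levels
--              for p in range(lstart, lstart + lsize)
--              for j in range(nb)]
--     return start + size, edges
-- ===== Notes on version B (the rewrite author's own statement) =====
-- stated objective: alternative
-- what changed: B never keeps the explicit frontier list of node ids: a first pass builds a table of contiguous level ranges (start, size, children-per-node), and a second pass emits each edge arithmetically from offsets within those ranges, whereas A grows a new_level list node by node across three nested loops.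
import Mathlib
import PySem

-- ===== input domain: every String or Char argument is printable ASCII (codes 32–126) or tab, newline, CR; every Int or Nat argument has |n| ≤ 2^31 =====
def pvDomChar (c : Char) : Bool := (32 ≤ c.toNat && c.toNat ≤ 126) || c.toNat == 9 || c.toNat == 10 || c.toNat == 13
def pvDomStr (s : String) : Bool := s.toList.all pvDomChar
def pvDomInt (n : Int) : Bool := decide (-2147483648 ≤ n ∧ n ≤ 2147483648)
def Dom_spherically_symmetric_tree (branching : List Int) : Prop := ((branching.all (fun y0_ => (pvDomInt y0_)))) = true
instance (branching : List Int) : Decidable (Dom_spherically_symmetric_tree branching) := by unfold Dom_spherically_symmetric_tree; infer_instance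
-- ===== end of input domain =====

-- B replaces A's explicit frontier list with a precomputed table of contiguous level
-- ranges and emits the edges arithmetically in a second pass (objective: alternative).

-- ===== PORT A =====
def spherically_symmetric_tree (branching : List Int) : Int × (List (Int × Int)) :=
  let st := branching.foldl
    (fun (st : List Int × Int × List (Int × Int)) b =>
      st.1.foldl
        (fun (st2 : List Int × Int × List (Int × Int)) v =>
          (PySem.List.pyRange 0 b 1).foldl
            (fun (st3 : List Int × Int × List (Int × Int)) _ =>
              (st3.1 ++ [st3.2.1], st3.2.1 + 1, st3.2.2 ++ [(v, st3.2.1)]))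
            st2)
        ([], st.2.1, st.2.2))
    ([0], 1, ([] : List (Int × Int)))
  (st.2.1, st.2.2)

-- ===== PORT B =====
def spherically_symmetric_tree_alt (branching : List Int) : Int × (List (Int × Int)) :=
  -- Pass 1: table of levels (level_start, level_size, children_per_node)
  let t := branching.foldl
    (fun (t : List (Int × Int × Int) × Int × Int) b =>
      let nb := if b > 0 then b else 0
      (t.1 ++ [(t.2.1, t.2.2, nb)], t.2.1 + t.2.2, t.2.2 * nb))
    (([] : List (Int × Int × Int)), 0, 1)
  -- Pass 2: emit edges arithmetically from the table
  let edges := t.1.flatMap (fun lv =>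
    (PySem.List.pyRange lv.1 (lv.1 + lv.2.1) 1).flatMap (fun p =>
      (PySem.List.pyRange 0 lv.2.2 1).map
        (fun j => (p, lv.1 + lv.2.1 + (p - lv.1) * lv.2.2 + j))))
  (t.2.1 + t.2.2, edges)

-- ===== PRECONDITION & SPEC =====
def Spec_spherically_symmetric_tree (branching : List Int) (out : Int × (List (Int × Int))) : Prop := out = spherically_symmetric_tree_alt branching
instance (branching : List Int) (out : Int × (List (Int × Int))) : Decidable (Spec_spherically_symmetric_tree branching out) := by unfold Spec_spherically_symmetric_tree; infer_instance

-- ===== CLAIM (what is proved, stated in full; the proofs are below) =====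
def Claim_equal_spherically_symmetric_tree : Prop := ∀ (branching : List Int), Dom_spherically_symmetric_tree branching → Spec_spherically_symmetric_tree branching (spherically_symmetric_tree branching)

-- ===== LEMMAS AND PROOFS =====

-- contiguous block of ids [s, s+k)
def idBlock (s : Int) (k : Nat) : List Int := (List.range k).map (fun i : Nat => s + (i : Int))

-- the m edges from parent v to children n, n+1, …, n+m-1
def childBlock (v n : Int) (m : Nat) : List (Int × Int) :=
  (List.range m).map (fun j : Nat => (v, n + (j : Int)))

-- edges of one level: k parents starting at id s, children allocated from n, m each
def levelEdges (s n : Int) (k m : Nat) : List (Int × Int) :=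
  match k with
  | 0 => []
  | k + 1 => childBlock s n m ++ levelEdges (s + 1) (n + m) k m

-- reference spec: (final level start, final level size, all edges) from level [s, s+k)
def buildLevels (branching : List Int) (s : Int) (k : Nat) : Int × Nat × List (Int × Int) :=
  match branching with
  | [] => (s, k, [])
  | b :: r =>
    let m := b.toNat
    let t := buildLevels r (s + k) (k * m)
    (t.1, t.2.1, levelEdges s (s + k) k m ++ t.2.2)

theorem idBlock_succ (s : Int) (k : Nat) : idBlock s (k + 1) = s :: idBlock (s + 1) k := by
  unfold idBlock
  rw [List.range_succ_eq_map, List.map_cons, List.map_map]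
  congr 1
  · simp
  · apply List.map_congr_left
    intro i _
    simp [Function.comp]
    ring

theorem idBlock_append (s : Int) (a c : Nat) :
    idBlock s a ++ idBlock (s + a) c = idBlock s (a + c) := by
  unfold idBlock
  rw [List.range_add, List.map_append, List.map_map]
  congr 1
  apply List.map_congr_left
  intro i _
  simp [Function.comp]
  ring

theorem childBlock_succ (v n : Int) (m : Nat) :
    childBlock v n (m + 1) = (v, n) :: childBlock v (n + 1) m := by
  unfold childBlock
  rw [List.range_succ_eq_map, List.map_cons, List.map_map]
  congr 1
  · simp
  · apply List.map_congr_left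
    intro j _
    simp [Function.comp]
    ring

-- A's innermost loop (over range(b)), acting on state (new_level, next_id, edges)
theorem a_inner (l : List Int) (v : Int) :
    ∀ (nl : List Int) (n : Int) (ed : List (Int × Int)),
    l.foldl (fun (st3 : List Int × Int × List (Int × Int)) _ =>
        (st3.1 ++ [st3.2.1], st3.2.1 + 1, st3.2.2 ++ [(v, st3.2.1)])) (nl, n, ed)
      = (nl ++ idBlock n l.length, n + l.length, ed ++ childBlock v n l.length) := by
  induction l with
  | nil => intro nl n ed; simp [idBlock, childBlock]
  | cons x xs ih =>
    intro nl n ed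
    simp only [List.foldl_cons, List.length_cons, ih]
    rw [idBlock_succ, childBlock_succ]
    simp only [Prod.mk.injEq]
    refine ⟨by simp, by push_cast; ring, by simp⟩

-- A's middle loop over the parents of one contiguous level
theorem a_level (b : Int) (m : Nat) (hm : m = b.toNat) (k : Nat) :
    ∀ (s : Int) (nl : List Int) (n : Int) (ed : List (Int × Int)),
    (idBlock s k).foldl
        (fun (st2 : List Int × Int × List (Int × Int)) v =>
          (PySem.List.pyRange 0 b 1).foldl
            (fun (st3 : List Int × Int × List (Int × Int)) _ =>
              (st3.1 ++ [st3.2.1], st3.2.1 + 1, st3.2.2 ++ [(v, st3.2.1)])) st2) (nl, n, ed)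
      = (nl ++ idBlock n (k * m), n + (k * m : Nat), ed ++ levelEdges s n k m) := by
  have hlen : (PySem.List.pyRange 0 b 1).length = m := by
    rw [PySem.List.length_pyRange_one]; omega
  induction k with
  | zero => intro s nl n ed; simp [idBlock, levelEdges]
  | succ k ih =>
    intro s nl n ed
    rw [idBlock_succ]
    simp only [List.foldl_cons]
    rw [a_inner, hlen, ih]
    rw [show (k + 1) * m = m + k * m from by ring]
    simp only [levelEdges, List.append_assoc, idBlock_append, Prod.mk.injEq]
    and_intros
    all_goals push_cast
    all_goals ring

-- A's outer loop: from any contiguous level, it computes buildLevels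
theorem a_main (branching : List Int) :
    ∀ (s : Int) (k : Nat) (ed : List (Int × Int)),
    branching.foldl
      (fun (st : List Int × Int × List (Int × Int)) b =>
        st.1.foldl
          (fun (st2 : List Int × Int × List (Int × Int)) v =>
            (PySem.List.pyRange 0 b 1).foldl
              (fun (st3 : List Int × Int × List (Int × Int)) _ =>
                (st3.1 ++ [st3.2.1], st3.2.1 + 1, st3.2.2 ++ [(v, st3.2.1)])) st2)
          ([], st.2.1, st.2.2))
      (idBlock s k, s + k, ed)
      = (idBlock (buildLevels branching s k).1 (buildLevels branching s k).2.1,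
         (buildLevels branching s k).1 + ((buildLevels branching s k).2.1 : Int),
         ed ++ (buildLevels branching s k).2.2) := by
  induction branching with
  | nil => intro s k ed; simp [buildLevels]
  | cons b r ih =>
    intro s k ed
    simp only [List.foldl_cons]
    rw [a_level b b.toNat rfl k s [] (s + k) ed]
    simp only [List.nil_append]
    have := ih (s + k) (k * b.toNat) (ed ++ levelEdges s (s + k) k b.toNat)
    rw [show (s + (k : Int)) + ((k * b.toNat : Nat) : Int)
          = (s + k) + ((k * b.toNat : Nat) : Int) by ring] at this
    rw [this]
    simp [buildLevels]

-- B pass 1: the level table from any starting (start, size)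
def mkLevels (branching : List Int) (s : Int) (k : Nat) : List (Int × Int × Int) :=
  match branching with
  | [] => []
  | b :: r => (s, (k : Int), (b.toNat : Int)) :: mkLevels r (s + k) (k * b.toNat)

theorem b_pass1 (branching : List Int) :
    ∀ (s : Int) (k : Nat) (acc : List (Int × Int × Int)),
    branching.foldl
      (fun (t : List (Int × Int × Int) × Int × Int) b =>
        let nb := if b > 0 then b else 0
        (t.1 ++ [(t.2.1, t.2.2, nb)], t.2.1 + t.2.2, t.2.2 * nb))
      (acc, s, (k : Int))
      = (acc ++ mkLevels branching s k,
         (buildLevels branching s k).1, ((buildLevels branching s k).2.1 : Int)) := by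
  induction branching with
  | nil => intro s k acc; simp [mkLevels, buildLevels]
  | cons b r ih =>
    intro s k acc
    have hnb : (if b > 0 then b else 0) = ((b.toNat : Int)) := by
      split_ifs <;> omega
    simp only [List.foldl_cons, hnb]
    rw [show (k : Int) * (b.toNat : Int) = ((k * b.toNat : Nat) : Int) by push_cast; ring]
    rw [ih (s + k) (k * b.toNat)]
    simp [mkLevels, buildLevels]

-- one level's comprehension equals levelEdges
theorem b_level (k m : Nat) :
    ∀ (s n : Int),
    (idBlock s k).flatMap (fun p => childBlock p (n + (p - s) * m) m) = levelEdges s n k m := by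
  induction k with
  | zero => intro s n; simp [idBlock, levelEdges]
  | succ k ih =>
    intro s n
    rw [idBlock_succ]
    simp only [List.flatMap_cons, levelEdges]
    congr 1
    · norm_num
    · rw [← ih (s + 1) (n + (m : Int))]
      congr 1
      funext p
      congr 1
      ring

-- B pass 2 on the table equals the collected edges of buildLevels
theorem b_pass2 (branching : List Int) :
    ∀ (s : Int) (k : Nat),
    (mkLevels branching s k).flatMap (fun lv =>
      (PySem.List.pyRange lv.1 (lv.1 + lv.2.1) 1).flatMap (fun p =>
        (PySem.List.pyRange 0 lv.2.2 1).map
          (fun j => (p, lv.1 + lv.2.1 + (p - lv.1) * lv.2.2 + j))))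
      = (buildLevels branching s k).2.2 := by
  induction branching with
  | nil => intro s k; simp [mkLevels, buildLevels]
  | cons b r ih =>
    intro s k
    simp only [mkLevels, List.flatMap_cons, buildLevels]
    congr 1
    · have hm : ((s + (k : Int)) - s).toNat = k := by omega
      have h2 : (((b.toNat : Int)) - 0).toNat = b.toNat := by omega
      simp only [PySem.List.pyRange_one, hm, h2]
      rw [← b_level k b.toNat s (s + (k : Int))]
      simp only [idBlock, childBlock, List.map_map]
      congr 1
      funext p
      simp [Function.comp]
    · exact ih (s + k) (k * b.toNat)

-- ===== VERDICT (by name: the statement is the Claim_ definition above) =====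
theorem spherically_symmetric_tree_spec : Claim_equal_spherically_symmetric_tree := by
  intro branching _
  unfold Spec_spherically_symmetric_tree spherically_symmetric_tree spherically_symmetric_tree_alt
  have h0 : (([(0 : Int)], (1 : Int), ([] : List (Int × Int))) : List Int × Int × List (Int × Int))
      = (idBlock 0 1, (0 : Int) + ((1 : Nat) : Int), ([] : List (Int × Int))) := by
    simp [idBlock]
  have h1 : ((([] : List (Int × Int × Int)), (0 : Int), (1 : Int)) : List (Int × Int × Int) × Int × Int)
      = (([] : List (Int × Int × Int)), (0 : Int), (((1 : Nat) : Int))) := by simp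
  rw [h0, a_main, h1, b_pass1]
  simp [b_pass2]
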